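-- pv_equiv track=rewrite | github.com/kunavamshi/gfg-potd | Difficulty: Medium/2D Difference Array/2d-difference-array.py | applyDiff2D
-- ===== SOURCE A (Python) =====
-- def applyDiff2D(mat, opr):
--     n = len(mat)
--     m = len(mat[0])
--
--     # Step 1: Initialize the difference matrix
--     diff = [[0] * (m + 1) for _ in range(n + 1)]
--
--     # Step 2: Apply each operation to the diff matrix
--     for v, r1, c1, r2, c2 in opr:
--         diff[r1][c1] += v
--         if c2 + 1 < m:
--             diff[r1][c2 + 1] -= v
--         if r2 + 1 < n:
--             diff[r2 + 1][c1] -= v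
--         if r2 + 1 < n and c2 + 1 < m:
--             diff[r2 + 1][c2 + 1] += v
--
--     # Step 3: Compute prefix sum row-wise
--     for i in range(n):
--         for j in range(1, m):
--             diff[i][j] += diff[i][j - 1]
--
--     # Step 4: Compute prefix sum column-wise
--     for j in range(m):
--         for i in range(1, n):
--             diff[i][j] += diff[i - 1][j]
--
--     # Step 5: Add the diff values to the original matrix
--     for i in range(n):
--         for j in range(m):
--             mat[i][j] += diff[i][j]
--
--     return mat
-- ===== SOURCE B (Python) =====
-- def applyDiff2D(mat, opr):
--     # 2D difference array evaluated directly: stamp each operation's corner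
--     # deltas, then give every cell the sum of the deltas in its upper-left
--     # region.  No prefix-sum passes, no in-place table updates.
--     n, m = len(mat), len(mat[0])
--     diff = [[0] * (m + 1) for _ in range(n + 1)]
--     for v, r1, c1, r2, c2 in opr:
--         diff[r1][c1] += v
--         if c2 + 1 < m:
--             diff[r1][c2 + 1] -= v
--         if r2 + 1 < n:
--             diff[r2 + 1][c1] -= v
--         if r2 + 1 < n and c2 + 1 < m:
--             diff[r2 + 1][c2 + 1] += v
--     for i in range(n):
--         for j in range(m):
--             mat[i][j] += sum(diff[a][b] for a in range(i + 1) for b in range(j + 1))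
--     return mat
-- ===== Notes on version B (the rewrite author's own statement) =====
-- stated objective: alternative
-- what changed: B keeps the corner stamping but drops both in-place prefix-sum passes and the separate add pass: every cell directly sums the stamped deltas in its upper-left region (a per-cell double sum instead of dynamic-programming prefix propagation).
import Mathlib
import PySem

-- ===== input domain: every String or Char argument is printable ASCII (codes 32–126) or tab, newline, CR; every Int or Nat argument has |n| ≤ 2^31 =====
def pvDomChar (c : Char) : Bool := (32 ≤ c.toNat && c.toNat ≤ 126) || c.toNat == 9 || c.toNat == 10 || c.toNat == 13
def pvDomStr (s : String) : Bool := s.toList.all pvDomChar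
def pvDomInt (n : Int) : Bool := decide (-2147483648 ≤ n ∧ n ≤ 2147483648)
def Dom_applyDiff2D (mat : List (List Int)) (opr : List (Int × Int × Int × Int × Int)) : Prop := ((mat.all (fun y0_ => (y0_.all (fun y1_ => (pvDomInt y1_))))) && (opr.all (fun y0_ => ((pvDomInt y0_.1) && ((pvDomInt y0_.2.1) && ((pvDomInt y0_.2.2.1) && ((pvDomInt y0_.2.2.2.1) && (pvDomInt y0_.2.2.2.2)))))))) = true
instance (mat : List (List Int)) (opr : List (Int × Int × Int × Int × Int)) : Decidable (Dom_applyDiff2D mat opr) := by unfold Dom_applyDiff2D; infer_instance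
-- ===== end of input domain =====

-- B keeps A's corner stamping but replaces both in-place prefix-sum passes and the separate add
-- pass by a direct per-cell sum of the stamped deltas (objective: alternative, not faster).
-- Like A, the Python B updates mat in place; the equivalence proved is about the RETURN value.

-- ===== PORT A =====
-- diff[a][b] read / write at Nat loop indices (Python list indexing; exact for in-range indices)
def pvGet2 (g : List (List Int)) (a b : Nat) : Int := (g.getD a []).getD b 0
def pvSetCell (g : List (List Int)) (a b : Nat) (x : Int) : List (List Int) :=
  g.set a ((g.getD a []).set b x)
-- diff[i][j] += v at Int indices from an operation (Python semantics incl. negative wraparound)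
def pvAdd2 (g : List (List Int)) (i j v : Int) : List (List Int) :=
  PySem.List.pySetD g i
    (PySem.List.pySetD (PySem.List.pyGetD g i [])
      j (PySem.List.pyGetD (PySem.List.pyGetD g i []) j 0 + v))

-- body of 'for v, r1, c1, r2, c2 in opr: …' (the corner stamping; shared by both Pythons verbatim)
def pvOpStep (n m : Nat) (g : List (List Int)) (op : Int × Int × Int × Int × Int) :
    List (List Int) :=
  let v := op.1; let r1 := op.2.1; let c1 := op.2.2.1; let r2 := op.2.2.2.1; let c2 := op.2.2.2.2
  let g := pvAdd2 g r1 c1 v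
  let g := if c2 + 1 < (m : Int) then pvAdd2 g r1 (c2 + 1) (-v) else g
  let g := if r2 + 1 < (n : Int) then pvAdd2 g (r2 + 1) c1 (-v) else g
  if r2 + 1 < (n : Int) ∧ c2 + 1 < (m : Int) then pvAdd2 g (r2 + 1) (c2 + 1) v else g

-- 'for j in range(1, m): diff[i][j] += diff[i][j-1]'
def pvRowScan (m : Nat) (g : List (List Int)) (i : Nat) : List (List Int) :=
  (List.range' 1 (m - 1)).foldl (fun g j => pvSetCell g i j (pvGet2 g i j + pvGet2 g i (j - 1))) g

-- 'for i in range(1, n): diff[i][j] += diff[i-1][j]'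
def pvColScan (n : Nat) (g : List (List Int)) (j : Nat) : List (List Int) :=
  (List.range' 1 (n - 1)).foldl (fun g i => pvSetCell g i j (pvGet2 g i j + pvGet2 g (i - 1) j)) g

-- 'for i in range(n): for j in range(m): mat[i][j] += diff[i][j]'
def pvAddPhase (n m : Nat) (g acc : List (List Int)) : List (List Int) :=
  (List.range n).foldl (fun acc i =>
    (List.range m).foldl (fun acc j => pvSetCell acc i j (pvGet2 acc i j + pvGet2 g i j)) acc) acc

def applyDiff2D (mat : List (List Int)) (opr : List (Int × Int × Int × Int × Int)) :
    List (List Int) :=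
  let n := mat.length
  let m := (PySem.List.pyGetD mat 0 []).length   -- len(mat[0]); IndexError on mat = [] is outside Pre_
  let diff := List.replicate (n + 1) (List.replicate (m + 1) (0 : Int))
  let diff := opr.foldl (pvOpStep n m) diff
  let diff := (List.range n).foldl (pvRowScan m) diff
  let diff := (List.range m).foldl (pvColScan n) diff
  pvAddPhase n m diff mat

-- ===== PORT B =====
-- 'sum(diff[a][b] for a in range(i + 1) for b in range(j + 1))'
def pvCellPref (diff : List (List Int)) (i j : Nat) : Int :=
  (List.range (i + 1)).foldl (fun s a =>
    (List.range (j + 1)).foldl (fun s b => s + pvGet2 diff a b) s) 0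

def applyDiff2D_alt (mat : List (List Int)) (opr : List (Int × Int × Int × Int × Int)) :
    List (List Int) :=
  let n := mat.length
  let m := (PySem.List.pyGetD mat 0 []).length   -- len(mat[0]); IndexError on mat = [] is outside Pre_
  let diff := List.replicate (n + 1) (List.replicate (m + 1) (0 : Int))
  let diff := opr.foldl (pvOpStep n m) diff
  (List.range n).foldl (fun acc i =>
    (List.range m).foldl (fun acc j =>
      pvSetCell acc i j (pvGet2 acc i j + pvCellPref diff i j)) acc) mat

-- ===== PRECONDITION & SPEC =====
-- Pre_ excludes exactly the inputs on which A raises IndexError: the empty matrix, a row shorter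
-- than the first row, or an operation whose written difference-table indices fall outside the
-- (n+1) x (m+1) table even after Python's negative-index wraparound.
def Pre_applyDiff2D (mat : List (List Int)) (opr : List (Int × Int × Int × Int × Int)) : Prop :=
  mat ≠ [] ∧ (∀ row ∈ mat, (mat.getD 0 []).length ≤ row.length) ∧
  ∀ op ∈ opr,
    -((mat.length : Int) + 1) ≤ op.2.1 ∧ op.2.1 ≤ (mat.length : Int) ∧
    -(((mat.getD 0 []).length : Int) + 1) ≤ op.2.2.1 ∧
    op.2.2.1 ≤ ((mat.getD 0 []).length : Int) ∧
    (op.2.2.2.1 + 1 < (mat.length : Int) → -((mat.length : Int) + 1) ≤ op.2.2.2.1 + 1) ∧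
    (op.2.2.2.2 + 1 < ((mat.getD 0 []).length : Int) →
      -(((mat.getD 0 []).length : Int) + 1) ≤ op.2.2.2.2 + 1)
instance (mat : List (List Int)) (opr : List (Int × Int × Int × Int × Int)) :
    Decidable (Pre_applyDiff2D mat opr) := by unfold Pre_applyDiff2D; infer_instance

def pvWitness_applyDiff2D : List (List Int) × (List (Int × Int × Int × Int × Int)) :=
  ([[0, 0], [0, 0]], [(3, 0, 0, 1, 1)])

def Spec_applyDiff2D (mat : List (List Int)) (opr : List (Int × Int × Int × Int × Int))
    (out : List (List Int)) : Prop := out = applyDiff2D_alt mat opr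
instance (mat : List (List Int)) (opr : List (Int × Int × Int × Int × Int))
    (out : List (List Int)) : Decidable (Spec_applyDiff2D mat opr out) := by
  unfold Spec_applyDiff2D; infer_instance

-- ===== CLAIM (what is proved, stated in full; the proofs are below) =====
def Claim_equal_applyDiff2D : Prop :=
  ∀ (mat : List (List Int)) (opr : List (Int × Int × Int × Int × Int)),
    Dom_applyDiff2D mat opr → Pre_applyDiff2D mat opr →
    Spec_applyDiff2D mat opr (applyDiff2D mat opr)

-- ===== LEMMAS AND PROOFS =====

-- shape: R rows, each of length C
def pvShape (R C : Nat) (g : List (List Int)) : Prop :=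
  g.length = R ∧ ∀ row ∈ g, row.length = C

-- bounds Pre_ guarantees for one operation (diff-table writes in range, possibly after wraparound)
def pvValid (n m : Nat) (op : Int × Int × Int × Int × Int) : Prop :=
  -((n : Int) + 1) ≤ op.2.1 ∧ op.2.1 ≤ (n : Int) ∧
  -((m : Int) + 1) ≤ op.2.2.1 ∧ op.2.2.1 ≤ (m : Int) ∧
  (op.2.2.2.1 + 1 < (n : Int) → -((n : Int) + 1) ≤ op.2.2.2.1 + 1) ∧
  (op.2.2.2.2 + 1 < (m : Int) → -((m : Int) + 1) ≤ op.2.2.2.2 + 1)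

-- Python index resolution into an axis of length L (0 ≤ i: itself; negative: from the end)
def pvWrap (L : Nat) (i : Int) : Nat := if 0 ≤ i then i.toNat else L - (-i).toNat

theorem pvGetD_eq_getElem {g : List (List Int)} {a : Nat} (h : a < g.length) :
    g.getD a [] = g[a] := by
  rw [List.getD_eq_getElem?_getD, List.getElem?_eq_getElem h]; rfl

theorem pvShape_row {R C : Nat} {g : List (List Int)} (h : pvShape R C g) {a : Nat} (ha : a < R) :
    (g.getD a []).length = C := by
  have ha' : a < g.length := by rw [h.1]; exact ha
  rw [pvGetD_eq_getElem ha']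
  exact h.2 _ (List.getElem_mem ha')

theorem pvGet2_setCell {g : List (List Int)} {a b : Nat} (ha : a < g.length)
    (hb : b < (g.getD a []).length) (x : Int) (a' b' : Nat) :
    pvGet2 (pvSetCell g a b x) a' b' = if a' = a ∧ b' = b then x else pvGet2 g a' b' := by
  rw [pvGetD_eq_getElem ha] at hb
  by_cases h1 : a' = a <;> by_cases h2 : b' = b <;>
    simp [pvGet2, pvSetCell, List.getD_eq_getElem?_getD, List.getElem?_set, h1, h2, ha, hb] <;>
    rw [if_neg (by omega)]

theorem pvShape_setCell {R C : Nat} {g : List (List Int)} (h : pvShape R C g) (a b : Nat)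
    (x : Int) : pvShape R C (pvSetCell g a b x) := by
  by_cases ha : a < g.length
  · refine ⟨by simpa [pvSetCell] using h.1, ?_⟩
    intro row hrow
    rcases List.mem_or_eq_of_mem_set hrow with hmem | heq
    · exact h.2 _ hmem
    · rw [heq, List.length_set, pvGetD_eq_getElem ha]
      exact h.2 _ (List.getElem_mem ha)
  · unfold pvSetCell
    rw [List.set_eq_of_length_le (by omega)]
    exact h

theorem pvSetCell_length (g : List (List Int)) (a b : Nat) (x : Int) :
    (pvSetCell g a b x).length = g.length := by
  simp [pvSetCell]

theorem pvSetCell_rowLen (g : List (List Int)) (a b : Nat) (x : Int) (a' : Nat) :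
    ((pvSetCell g a b x).getD a' []).length = (g.getD a' []).length := by
  unfold pvSetCell
  rw [List.getD_eq_getElem?_getD, List.getElem?_set]
  by_cases h1 : a = a'
  · subst h1
    by_cases h2 : a < g.length
    · rw [if_pos rfl, if_pos h2]
      simp [List.length_set]
    · rw [if_pos rfl, if_neg h2]
      have hnone : g[a]? = none := by
        rw [List.getElem?_eq_none_iff]; omega
      rw [List.getD_eq_getElem?_getD, hnone]
  · rw [if_neg h1, ← List.getD_eq_getElem?_getD]

theorem pvIdx_wrap {L : Nat} {i : Int} (h1 : -((L : Int)) ≤ i) (h2 : i < (L : Int)) :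
    PySem.List.pyIdx? L i = some (pvWrap L i) := by
  unfold PySem.List.pyIdx? pvWrap
  split_ifs <;> rfl

theorem pvWrap_lt {L : Nat} {i : Int} (h1 : -((L : Int)) ≤ i) (h2 : i < (L : Int)) :
    pvWrap L i < L := by
  unfold pvWrap
  split_ifs <;> omega

theorem pvAdd2_eq {n m : Nat} {g : List (List Int)} (h : pvShape (n + 1) (m + 1) g) {i j : Int}
    (hi1 : -((n : Int) + 1) ≤ i) (hi2 : i ≤ (n : Int))
    (hj1 : -((m : Int) + 1) ≤ j) (hj2 : j ≤ (m : Int)) (v : Int) :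
    pvAdd2 g i j v = pvSetCell g (pvWrap (n + 1) i) (pvWrap (m + 1) j)
      (pvGet2 g (pvWrap (n + 1) i) (pvWrap (m + 1) j) + v) := by
  have hi1' : -(((n + 1 : Nat)) : Int) ≤ i := by push_cast; omega
  have hi2' : i < ((n + 1 : Nat) : Int) := by push_cast; omega
  have hj1' : -(((m + 1 : Nat)) : Int) ≤ j := by push_cast; omega
  have hj2' : j < ((m + 1 : Nat) : Int) := by push_cast; omega
  have hrow : (g.getD (pvWrap (n + 1) i) []).length = m + 1 :=
    pvShape_row h (pvWrap_lt hi1' hi2')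
  have hidx : PySem.List.pyIdx? g.length i = some (pvWrap (n + 1) i) := by
    rw [h.1]; exact pvIdx_wrap hi1' hi2'
  have hjdx : PySem.List.pyIdx? (g.getD (pvWrap (n + 1) i) []).length j
      = some (pvWrap (m + 1) j) := by
    rw [hrow]; exact pvIdx_wrap hj1' hj2'
  have hget : PySem.List.pyGetD g i [] = g.getD (pvWrap (n + 1) i) [] := by
    unfold PySem.List.pyGetD PySem.List.pyGet?
    rw [hidx]
    show (g[pvWrap (n + 1) i]?).getD [] = _
    rw [← List.getD_eq_getElem?_getD]
  unfold pvAdd2 pvSetCell pvGet2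
  rw [hget]
  unfold PySem.List.pySetD PySem.List.pySet?
  rw [hidx, hjdx]
  have hgetj : PySem.List.pyGetD (g.getD (pvWrap (n + 1) i) []) j 0
      = (g.getD (pvWrap (n + 1) i) []).getD (pvWrap (m + 1) j) 0 := by
    unfold PySem.List.pyGetD PySem.List.pyGet?
    rw [hjdx]
    show ((g.getD (pvWrap (n + 1) i) [])[pvWrap (m + 1) j]?).getD 0 = _
    rw [← List.getD_eq_getElem?_getD]
  rw [hgetj]
  rfl

theorem pvShape_add2 {n m : Nat} {g : List (List Int)} (h : pvShape (n + 1) (m + 1) g)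
    {i j : Int} (hi1 : -((n : Int) + 1) ≤ i) (hi2 : i ≤ (n : Int))
    (hj1 : -((m : Int) + 1) ≤ j) (hj2 : j ≤ (m : Int)) (v : Int) :
    pvShape (n + 1) (m + 1) (pvAdd2 g i j v) := by
  rw [pvAdd2_eq h hi1 hi2 hj1 hj2]
  exact pvShape_setCell h _ _ _

theorem pvShape_opStep {n m : Nat} {g : List (List Int)} (h : pvShape (n + 1) (m + 1) g)
    {op : Int × Int × Int × Int × Int} (hv : pvValid n m op) :
    pvShape (n + 1) (m + 1) (pvOpStep n m g op) := by
  obtain ⟨h1, h2, h3, h4, h5, h6⟩ := hv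
  simp only [pvOpStep]
  split_ifs with hRC hC hR hR' <;>
    repeat'
      first
      | assumption
      | apply pvShape_add2 (hi1 := by omega) (hi2 := by omega) (hj1 := by omega)
          (hj2 := by omega)

theorem pvOpsShape {n m : Nat} (opr : List (Int × Int × Int × Int × Int))
    (hv : ∀ op ∈ opr, pvValid n m op) {g : List (List Int)}
    (h : pvShape (n + 1) (m + 1) g) :
    pvShape (n + 1) (m + 1) (opr.foldl (pvOpStep n m) g) := by
  induction opr generalizing g with
  | nil => exact h
  | cons op tl ih =>
    exact ih (fun o ho => hv o (by simp [ho])) (pvShape_opStep h (hv op (by simp)))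

theorem pvRowScanAux {n m : Nat} {g : List (List Int)} (h : pvShape (n + 1) (m + 1) g)
    {i : Nat} (hi : i < n) (k : Nat) (hk : k < m) :
    pvShape (n + 1) (m + 1)
      ((List.range' 1 k).foldl
        (fun g j => pvSetCell g i j (pvGet2 g i j + pvGet2 g i (j - 1))) g) ∧
    ∀ a b, pvGet2
      ((List.range' 1 k).foldl
        (fun g j => pvSetCell g i j (pvGet2 g i j + pvGet2 g i (j - 1))) g) a b =
      if a = i ∧ 1 ≤ b ∧ b ≤ k then ∑ t ∈ Finset.range (b + 1), pvGet2 g i t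
      else pvGet2 g a b := by
  induction k with
  | zero =>
    refine ⟨h, fun a b => ?_⟩
    rw [List.range'_zero, List.foldl_nil, if_neg (by omega)]
  | succ k ih =>
    obtain ⟨ihSh, ihGet⟩ := ih (by omega)
    have hconcat : List.range' 1 (k + 1) = List.range' 1 k ++ [k + 1] := by
      rw [List.range'_concat]; simp [Nat.add_comm]
    rw [hconcat, List.foldl_append, List.foldl_cons, List.foldl_nil]
    have ha : i < ((List.range' 1 k).foldl
        (fun g j => pvSetCell g i j (pvGet2 g i j + pvGet2 g i (j - 1))) g).length := by
      rw [ihSh.1]; omega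
    have hb : k + 1 - 1 + 1 < (((List.range' 1 k).foldl
        (fun g j => pvSetCell g i j (pvGet2 g i j + pvGet2 g i (j - 1))) g).getD i []).length := by
      rw [pvShape_row ihSh (by omega)]; omega
    refine ⟨pvShape_setCell ihSh _ _ _, fun a b => ?_⟩
    rw [pvGet2_setCell ha (by simpa using hb)]
    by_cases hab : a = i ∧ b = k + 1
    · rw [hab.1, hab.2, if_pos ⟨rfl, rfl⟩, if_pos ⟨rfl, by omega, le_rfl⟩]
      rw [ihGet i (k + 1), if_neg (by omega)]
      simp only [Nat.add_sub_cancel]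
      rw [ihGet i k]
      by_cases hk0 : k = 0
      · subst hk0
        rw [if_neg (by omega)]
        simp [Finset.sum_range_succ]
        ring
      · rw [if_pos ⟨rfl, by omega, le_rfl⟩]
        conv_rhs => rw [Finset.sum_range_succ]
        ring
    · rw [if_neg hab, ihGet a b]
      split_ifs <;> first | rfl | (exfalso; omega)

theorem pvRowScan_get2 {n m : Nat} {g : List (List Int)} (h : pvShape (n + 1) (m + 1) g)
    {i : Nat} (hi : i < n) :
    pvShape (n + 1) (m + 1) (pvRowScan m g i) ∧
    ∀ a b, pvGet2 (pvRowScan m g i) a b =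
      if a = i ∧ b < m then ∑ t ∈ Finset.range (b + 1), pvGet2 g i t else pvGet2 g a b := by
  by_cases hm : m = 0
  · subst hm
    refine ⟨h, fun a b => ?_⟩
    unfold pvRowScan
    rw [List.range'_zero, List.foldl_nil, if_neg (by omega)]
  · obtain ⟨auxSh, auxGet⟩ := pvRowScanAux h hi (m - 1) (by omega)
    refine ⟨auxSh, fun a b => ?_⟩
    unfold pvRowScan
    rw [auxGet a b]
    by_cases hb0 : a = i ∧ b = 0
    · rw [if_neg (by omega), if_pos (by omega), hb0.1, hb0.2, Finset.sum_range_one]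
    · split_ifs <;> first | rfl | (exfalso; omega)

theorem pvRowPhase {n m : Nat} {g : List (List Int)} (h : pvShape (n + 1) (m + 1) g)
    (k : Nat) (hk : k ≤ n) :
    pvShape (n + 1) (m + 1) ((List.range k).foldl (pvRowScan m) g) ∧
    ∀ a b, pvGet2 ((List.range k).foldl (pvRowScan m) g) a b =
      if a < k ∧ b < m then ∑ t ∈ Finset.range (b + 1), pvGet2 g a t else pvGet2 g a b := by
  induction k with
  | zero =>
    refine ⟨h, fun a b => ?_⟩
    rw [List.range_zero, List.foldl_nil, if_neg (by omega)]
  | succ k ih =>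
    obtain ⟨ihSh, ihGet⟩ := ih (by omega)
    rw [List.range_succ, List.foldl_append, List.foldl_cons, List.foldl_nil]
    obtain ⟨sSh, sGet⟩ := pvRowScan_get2 ihSh (show k < n by omega)
    refine ⟨sSh, fun a b => ?_⟩
    rw [sGet a b]
    by_cases hab : a = k ∧ b < m
    · rw [if_pos hab, if_pos (by omega), hab.1]
      refine Finset.sum_congr rfl (fun t ht => ?_)
      rw [ihGet k t, if_neg (by omega)]
    · rw [if_neg hab, ihGet a b]
      split_ifs <;> first | rfl | (exfalso; omega)

theorem pvColScanAux {n m : Nat} {g : List (List Int)} (h : pvShape (n + 1) (m + 1) g)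
    {j : Nat} (hj : j < m) (k : Nat) (hk : k < n) :
    pvShape (n + 1) (m + 1)
      ((List.range' 1 k).foldl
        (fun g i => pvSetCell g i j (pvGet2 g i j + pvGet2 g (i - 1) j)) g) ∧
    ∀ a b, pvGet2
      ((List.range' 1 k).foldl
        (fun g i => pvSetCell g i j (pvGet2 g i j + pvGet2 g (i - 1) j)) g) a b =
      if b = j ∧ 1 ≤ a ∧ a ≤ k then ∑ t ∈ Finset.range (a + 1), pvGet2 g t j
      else pvGet2 g a b := by
  induction k with
  | zero =>
    refine ⟨h, fun a b => ?_⟩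
    rw [List.range'_zero, List.foldl_nil, if_neg (by omega)]
  | succ k ih =>
    obtain ⟨ihSh, ihGet⟩ := ih (by omega)
    have hconcat : List.range' 1 (k + 1) = List.range' 1 k ++ [k + 1] := by
      rw [List.range'_concat]; simp [Nat.add_comm]
    rw [hconcat, List.foldl_append, List.foldl_cons, List.foldl_nil]
    have ha : k + 1 < ((List.range' 1 k).foldl
        (fun g i => pvSetCell g i j (pvGet2 g i j + pvGet2 g (i - 1) j)) g).length := by
      rw [ihSh.1]; omega
    have hb : j < (((List.range' 1 k).foldl
        (fun g i => pvSetCell g i j (pvGet2 g i j + pvGet2 g (i - 1) j)) g).getD (k + 1) []).length := by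
      rw [pvShape_row ihSh (by omega)]; omega
    refine ⟨pvShape_setCell ihSh _ _ _, fun a b => ?_⟩
    rw [pvGet2_setCell ha hb]
    by_cases hab : a = k + 1 ∧ b = j
    · rw [hab.1, hab.2, if_pos ⟨rfl, rfl⟩, if_pos ⟨rfl, by omega, le_rfl⟩]
      rw [ihGet (k + 1) j, if_neg (by omega)]
      simp only [Nat.add_sub_cancel]
      rw [ihGet k j]
      by_cases hk0 : k = 0
      · subst hk0
        rw [if_neg (by omega)]
        simp [Finset.sum_range_succ]
        ring
      · rw [if_pos ⟨rfl, by omega, le_rfl⟩]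
        conv_rhs => rw [Finset.sum_range_succ]
        ring
    · rw [if_neg hab, ihGet a b]
      split_ifs <;> first | rfl | (exfalso; omega)

theorem pvColScan_get2 {n m : Nat} {g : List (List Int)} (h : pvShape (n + 1) (m + 1) g)
    {j : Nat} (hj : j < m) :
    pvShape (n + 1) (m + 1) (pvColScan n g j) ∧
    ∀ a b, pvGet2 (pvColScan n g j) a b =
      if b = j ∧ a < n then ∑ t ∈ Finset.range (a + 1), pvGet2 g t j else pvGet2 g a b := by
  by_cases hn : n = 0
  · subst hn
    refine ⟨h, fun a b => ?_⟩
    unfold pvColScan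
    rw [List.range'_zero, List.foldl_nil, if_neg (by omega)]
  · obtain ⟨auxSh, auxGet⟩ := pvColScanAux h hj (n - 1) (by omega)
    refine ⟨auxSh, fun a b => ?_⟩
    unfold pvColScan
    rw [auxGet a b]
    by_cases ha0 : a = 0 ∧ b = j
    · rw [if_neg (by omega), if_pos (by omega), ha0.1, ha0.2, Finset.sum_range_one]
    · split_ifs <;> first | rfl | (exfalso; omega)

theorem pvColPhase {n m : Nat} {g : List (List Int)} (h : pvShape (n + 1) (m + 1) g)
    (k : Nat) (hk : k ≤ m) :
    pvShape (n + 1) (m + 1) ((List.range k).foldl (pvColScan n) g) ∧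
    ∀ a b, pvGet2 ((List.range k).foldl (pvColScan n) g) a b =
      if a < n ∧ b < k then ∑ t ∈ Finset.range (a + 1), pvGet2 g t b else pvGet2 g a b := by
  induction k with
  | zero =>
    refine ⟨h, fun a b => ?_⟩
    rw [List.range_zero, List.foldl_nil, if_neg (by omega)]
  | succ k ih =>
    obtain ⟨ihSh, ihGet⟩ := ih (by omega)
    rw [List.range_succ, List.foldl_append, List.foldl_cons, List.foldl_nil]
    obtain ⟨sSh, sGet⟩ := pvColScan_get2 ihSh (show k < m by omega)
    refine ⟨sSh, fun a b => ?_⟩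
    rw [sGet a b]
    by_cases hab : b = k ∧ a < n
    · rw [if_pos hab, if_pos (by omega), hab.1]
      refine Finset.sum_congr rfl (fun t ht => ?_)
      rw [ihGet t k, if_neg (by omega)]
    · rw [if_neg hab, ihGet a b]
      split_ifs <;> first | rfl | (exfalso; omega)

theorem pvWriteRowAux (f : Nat → Nat → Int) {n m : Nat} {mat acc : List (List Int)}
    (hlen : acc.length = mat.length) (hrowlen : ∀ a, (acc.getD a []).length = (mat.getD a []).length)
    (hn : mat.length = n) (hge : ∀ a, a < n → m ≤ (mat.getD a []).length)
    {i : Nat} (hi : i < n) (k : Nat) (hk : k ≤ m) :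
    (((List.range k).foldl
        (fun acc j => pvSetCell acc i j (pvGet2 acc i j + f i j)) acc).length = mat.length ∧
      ∀ a, (((List.range k).foldl
        (fun acc j => pvSetCell acc i j (pvGet2 acc i j + f i j)) acc).getD a []).length =
          (mat.getD a []).length) ∧
    ∀ a b, pvGet2 ((List.range k).foldl
        (fun acc j => pvSetCell acc i j (pvGet2 acc i j + f i j)) acc) a b =
      if a = i ∧ b < k then pvGet2 acc a b + f a b else pvGet2 acc a b := by
  induction k with
  | zero =>
    refine ⟨⟨hlen, hrowlen⟩, fun a b => ?_⟩
    rw [List.range_zero, List.foldl_nil, if_neg (by omega)]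
  | succ k ih =>
    obtain ⟨⟨ihLen, ihRow⟩, ihGet⟩ := ih (by omega)
    rw [List.range_succ, List.foldl_append, List.foldl_cons, List.foldl_nil]
    have ha : i < ((List.range k).foldl
        (fun acc j => pvSetCell acc i j (pvGet2 acc i j + f i j)) acc).length := by
      rw [ihLen]; omega
    have hb : k < (((List.range k).foldl
        (fun acc j => pvSetCell acc i j (pvGet2 acc i j + f i j)) acc).getD i []).length := by
      rw [ihRow i]
      have := hge i hi
      omega
    have hsetRow : ∀ a, ((pvSetCell ((List.range k).foldl
        (fun acc j => pvSetCell acc i j (pvGet2 acc i j + f i j)) acc) i k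
          (pvGet2 ((List.range k).foldl
            (fun acc j => pvSetCell acc i j (pvGet2 acc i j + f i j)) acc) i k + f i k)).getD a []).length =
        (mat.getD a []).length := by
      intro a
      rw [pvSetCell_rowLen, ihRow a]
    refine ⟨⟨by rw [pvSetCell_length, ihLen], hsetRow⟩, fun a b => ?_⟩
    rw [pvGet2_setCell ha hb]
    by_cases hab : a = i ∧ b = k
    · rw [hab.1, hab.2, if_pos ⟨rfl, rfl⟩, if_pos ⟨rfl, by omega⟩]
      rw [ihGet i k, if_neg (by omega)]
    · rw [if_neg hab, ihGet a b]
      split_ifs <;> first | rfl | (exfalso; omega)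

theorem pvWritePhase (f : Nat → Nat → Int) {n m : Nat} {mat : List (List Int)}
    (hn : mat.length = n) (hge : ∀ a, a < n → m ≤ (mat.getD a []).length) :
    (((List.range n).foldl (fun acc i =>
        (List.range m).foldl (fun acc j =>
          pvSetCell acc i j (pvGet2 acc i j + f i j)) acc) mat).length = mat.length ∧
      ∀ a, (((List.range n).foldl (fun acc i =>
        (List.range m).foldl (fun acc j =>
          pvSetCell acc i j (pvGet2 acc i j + f i j)) acc) mat).getD a []).length =
          (mat.getD a []).length) ∧
    ∀ a b, pvGet2 ((List.range n).foldl (fun acc i =>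
        (List.range m).foldl (fun acc j =>
          pvSetCell acc i j (pvGet2 acc i j + f i j)) acc) mat) a b =
      if a < n ∧ b < m then pvGet2 mat a b + f a b else pvGet2 mat a b := by
  suffices hgen : ∀ k, k ≤ n →
      (((List.range k).foldl (fun acc i =>
          (List.range m).foldl (fun acc j =>
            pvSetCell acc i j (pvGet2 acc i j + f i j)) acc) mat).length = mat.length ∧
        ∀ a, (((List.range k).foldl (fun acc i =>
          (List.range m).foldl (fun acc j =>
            pvSetCell acc i j (pvGet2 acc i j + f i j)) acc) mat).getD a []).length =
            (mat.getD a []).length) ∧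
      ∀ a b, pvGet2 ((List.range k).foldl (fun acc i =>
          (List.range m).foldl (fun acc j =>
            pvSetCell acc i j (pvGet2 acc i j + f i j)) acc) mat) a b =
        if a < k ∧ b < m then pvGet2 mat a b + f a b else pvGet2 mat a b by
    exact hgen n le_rfl
  intro k hk
  induction k with
  | zero =>
    refine ⟨⟨rfl, fun a => rfl⟩, fun a b => ?_⟩
    rw [List.range_zero, List.foldl_nil, if_neg (by omega)]
  | succ k ih =>
    obtain ⟨⟨ihLen, ihRow⟩, ihGet⟩ := ih (by omega)
    rw [List.range_succ, List.foldl_append, List.foldl_cons, List.foldl_nil]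
    obtain ⟨⟨sLen, sRow⟩, sGet⟩ :=
      pvWriteRowAux f ihLen ihRow hn hge (show k < n by omega) m le_rfl
    refine ⟨⟨sLen, sRow⟩, fun a b => ?_⟩
    rw [sGet a b]
    by_cases hab : a = k ∧ b < m
    · rw [if_pos hab, if_pos (by omega), ihGet a b, if_neg (by omega)]
    · rw [if_neg hab, ihGet a b]
      split_ifs <;> first | rfl | (exfalso; omega)

-- B's inner generator sum is the row-slice sum
theorem pvFoldSum (f : Nat → Int) (k : Nat) (s0 : Int) :
    (List.range k).foldl (fun s b => s + f b) s0 = s0 + ∑ t ∈ Finset.range k, f t := by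
  induction k generalizing s0 with
  | zero => simp
  | succ k ih =>
    rw [List.range_succ, List.foldl_append, List.foldl_cons, List.foldl_nil, ih,
      Finset.sum_range_succ]
    ring

-- B's per-cell double sum is the double Finset sum
theorem pvCellPref_eq (diff : List (List Int)) (i j : Nat) :
    pvCellPref diff i j =
      ∑ s ∈ Finset.range (i + 1), ∑ t ∈ Finset.range (j + 1), pvGet2 diff s t := by
  unfold pvCellPref
  induction i with
  | zero => simp [pvFoldSum]
  | succ i ih =>
    rw [List.range_succ (n := i + 1), List.foldl_append, List.foldl_cons, List.foldl_nil,
      pvFoldSum (fun b => pvGet2 diff (i + 1) b) (j + 1), ih]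
    conv_rhs => rw [Finset.sum_range_succ]

theorem pvGet2_eq_getElem {g : List (List Int)} {a b : Nat} (ha : a < g.length)
    (hb : b < g[a].length) : pvGet2 g a b = g[a][b] := by
  unfold pvGet2
  rw [pvGetD_eq_getElem ha, List.getD_eq_getElem?_getD, List.getElem?_eq_getElem hb]
  rfl

-- ===== VERDICT (by name: the statement is the Claim_ definition above) =====
theorem applyDiff2D_spec : Claim_equal_applyDiff2D := by
  intro mat opr _hdom hpre
  obtain ⟨hne, hge, hops⟩ := hpre
  unfold Spec_applyDiff2D
  simp only [applyDiff2D, applyDiff2D_alt, pvAddPhase, PySem.List.pyGetD_zero]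
  set n := mat.length with hn
  set m := (mat.getD 0 []).length with hm
  set g1 := opr.foldl (pvOpStep n m)
    (List.replicate (n + 1) (List.replicate (m + 1) (0 : Int))) with hg1
  set g2 := (List.range n).foldl (pvRowScan m) g1 with hg2
  set g3 := (List.range m).foldl (pvColScan n) g2 with hg3
  have hvalid : ∀ op ∈ opr, pvValid n m op := hops
  have sh0 : pvShape (n + 1) (m + 1)
      (List.replicate (n + 1) (List.replicate (m + 1) (0 : Int))) := by
    refine ⟨List.length_replicate, ?_⟩
    intro row hrow
    rw [List.eq_of_mem_replicate hrow]
    exact List.length_replicate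
  have sh1 : pvShape (n + 1) (m + 1) g1 := pvOpsShape opr hvalid sh0
  obtain ⟨sh2, get2s⟩ := pvRowPhase sh1 n le_rfl
  obtain ⟨sh3, get3s⟩ := pvColPhase sh2 m le_rfl
  have hgem : ∀ a, a < n → m ≤ (mat.getD a []).length := by
    intro a ha
    rw [pvGetD_eq_getElem (show a < mat.length from ha)]
    exact hge _ (List.getElem_mem ha)
  obtain ⟨⟨shALen, shARow⟩, getA⟩ := pvWritePhase (fun i j => pvGet2 g3 i j) hn.symm hgem
  obtain ⟨⟨shBLen, shBRow⟩, getB⟩ := pvWritePhase (fun i j => pvCellPref g1 i j) hn.symm hgem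
  -- the common per-cell value: A's two prefix passes = B's direct double sum
  have hcore : ∀ a b, a < n → b < m → pvGet2 g3 a b = pvCellPref g1 a b := by
    intro a b ha hb
    rw [pvCellPref_eq, get3s a b, if_pos ⟨ha, hb⟩]
    refine Finset.sum_congr rfl (fun t ht => ?_)
    have htn : t < n := by have := Finset.mem_range.mp ht; omega
    rw [get2s t b, if_pos ⟨htn, hb⟩]
  refine List.ext_getElem (by rw [shALen, shBLen]) (fun a h1 h2 => ?_)
  have han : a < n := by rw [hn, ← shALen]; exact h1
  refine List.ext_getElem ?_ (fun b hb1 hb2 => ?_)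
  · rw [← pvGetD_eq_getElem h1, ← pvGetD_eq_getElem h2, shARow a, shBRow a]
  · rw [← pvGet2_eq_getElem h1 hb1, ← pvGet2_eq_getElem h2 hb2, getA a b, getB a b]
    by_cases hin : a < n ∧ b < m
    · rw [if_pos hin, if_pos hin, hcore a b hin.1 hin.2]
    · rw [if_neg hin, if_neg hin]
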